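-- pv_equiv track=rewrite | github.com/Alhafat/Python | exp/chapter_2/exp_5.py | perform_operations
-- ===== SOURCE A (Python) =====
-- def perform_operations(nums, signs):
--     nums = list(map(int, nums))
--     result = nums.pop(0)
--     # n = 1
--     for s in signs:
--         if s == '+':
--             result += nums.pop(0)
--         if s == '-':
--             result -= nums.pop(0)
--         # n += 1
--     return result
-- ===== SOURCE B (Python) =====
-- def perform_operations(nums, signs):
--     nums = [int(x) for x in nums]
--     terms = [nums[0]]
--     i = 1
--     for s in signs:
--         if s == '+':
--             terms.append(nums[i])
--             i += 1
--         elif s == '-':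
--             terms.append(-nums[i])
--             i += 1
--     return sum(terms)
-- ===== Notes on version B (the rewrite author's own statement) =====
-- stated objective: alternative
-- what changed: B indexes into the intact list and collects signed terms which it sums at the end, instead of mutating the list with pop(0) while accumulating a running result.
import Mathlib
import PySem

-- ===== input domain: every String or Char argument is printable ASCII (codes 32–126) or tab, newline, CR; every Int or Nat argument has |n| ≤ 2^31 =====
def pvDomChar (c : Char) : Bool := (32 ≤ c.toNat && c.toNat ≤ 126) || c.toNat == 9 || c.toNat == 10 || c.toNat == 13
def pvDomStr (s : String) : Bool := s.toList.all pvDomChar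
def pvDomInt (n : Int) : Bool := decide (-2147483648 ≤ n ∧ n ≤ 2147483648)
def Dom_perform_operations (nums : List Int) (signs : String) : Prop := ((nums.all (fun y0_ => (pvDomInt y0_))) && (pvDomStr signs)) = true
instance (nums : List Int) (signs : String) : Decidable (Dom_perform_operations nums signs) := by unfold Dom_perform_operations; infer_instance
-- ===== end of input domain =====

-- B collects signed terms by indexing the intact list and sums them at the end, instead of
-- A's running accumulator over a list mutated by pop(0) (objective: alternative decomposition).


-- ===== PORT A =====
-- for s in signs: two sequential ifs, each popping the front of the mutating list.
-- A roaming `none` marks an IndexError of pop(0); those inputs are excluded by Pre_.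
def pvALoop (cs : List Char) (st : Option (Int × List Int)) : Option (Int × List Int) :=
  cs.foldl (fun st s =>
    match st with
    | none => none
    | some rs =>
      match (if s = '+' then (PySem.List.pop? rs.2 0).map (fun p => (rs.1 + p.1, p.2)) else some rs) with
      | none => none
      | some rs' => if s = '-' then (PySem.List.pop? rs'.2 0).map (fun p => (rs'.1 - p.1, p.2)) else some rs') st

def perform_operations (nums : List Int) (signs : String) : Int :=
  let nums := nums.map (fun x => x)     -- nums = list(map(int, nums)); int is the identity on Int
  match PySem.List.pop? nums 0 with     -- result = nums.pop(0)
  | none => 0                           -- IndexError; excluded by Pre_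
  | some rs => (pvALoop signs.toList (some rs)).elim 0 Prod.fst

-- ===== PORT B =====
-- state (terms, i): signed terms collected so far, next index into the untouched list.
-- (pyGet? …).getD 0 is an IndexError of nums[i]; those inputs are excluded by Pre_.
def pvBLoop (nums : List Int) (cs : List Char) (st : List Int × Int) : List Int × Int :=
  cs.foldl (fun st s =>
    if s = '+' then (st.1 ++ [(PySem.List.pyGet? nums st.2).getD 0], st.2 + 1)
    else if s = '-' then (st.1 ++ [-((PySem.List.pyGet? nums st.2).getD 0)], st.2 + 1)
    else st) st

def perform_operations_alt (nums : List Int) (signs : String) : Int :=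
  let nums := nums.map (fun x => x)     -- nums = [int(x) for x in nums]
  (pvBLoop nums signs.toList ([(PySem.List.pyGet? nums 0).getD 0], 1)).1.sum

-- ===== PRECONDITION & SPEC =====
-- Pre_ excludes exactly the inputs where A raises IndexError: an empty nums, or fewer than
-- (number of '+'/'-' signs) + 1 numbers.
def Pre_perform_operations (nums : List Int) (signs : String) : Prop :=
  (signs.toList.countP (fun c => c == '+' || c == '-')) + 1 ≤ nums.length
instance (nums : List Int) (signs : String) : Decidable (Pre_perform_operations nums signs) := by unfold Pre_perform_operations; infer_instance
def pvWitness_perform_operations : List Int × String := ([3, 4, 5], "+-")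

def Spec_perform_operations (nums : List Int) (signs : String) (out : Int) : Prop := out = perform_operations_alt nums signs
instance (nums : List Int) (signs : String) (out : Int) : Decidable (Spec_perform_operations nums signs out) := by unfold Spec_perform_operations; infer_instance

-- ===== CLAIM (what is proved, stated in full; the proofs are below) =====
def Claim_equal_perform_operations : Prop := ∀ (nums : List Int) (signs : String), Dom_perform_operations nums signs → Pre_perform_operations nums signs → Spec_perform_operations nums signs (perform_operations nums signs)

-- ===== LEMMAS AND PROOFS =====

-- Loop invariant: A's state is (sum of B's terms, the part of nums that B has not indexed yet).
lemma pv_loop_agree : ∀ (cs : List Char) (nums terms : List Int) (i : Nat),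
    cs.countP (fun c => c == '+' || c == '-') + i ≤ nums.length →
    (pvALoop cs (some (terms.sum, nums.drop i))).elim 0 Prod.fst
      = (pvBLoop nums cs (terms, (i : Int))).1.sum := by
  intro cs
  induction cs with
  | nil => intro nums terms i _; simp [pvALoop, pvBLoop]
  | cons c cs ih =>
    intro nums terms i hlen
    by_cases hp : c = '+'
    · have hi : i < nums.length := by
        simp [hp] at hlen; omega
      have hpop : PySem.List.pop? (nums.drop i) 0 = some (nums[i], nums.drop (i + 1)) := by
        rw [(List.getElem_cons_drop hi).symm]; exact PySem.List.pop?_zero_cons _ _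
      have hget : PySem.List.pyGet? nums (i : Int) = some nums[i] := by
        simp [PySem.List.pyGet?_natCast, List.getElem?_eq_getElem hi]
      have hstep : ((i : Int) + 1) = ((i + 1 : Nat) : Int) := by push_cast; ring
      simp only [pvALoop, pvBLoop, List.foldl_cons, hp, hpop, Option.map_some, hget, hstep]
      have h2 : ('+' : Char) ≠ '-' := by decide
      simp only [if_neg h2]
      have := ih nums (terms ++ [nums[i]]) (i + 1)
        (by simp [hp] at hlen ⊢; omega)
      simpa [pvALoop, pvBLoop, List.sum_append] using this
    · by_cases hm : c = '-'
      · have hi : i < nums.length := by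
          simp [hm] at hlen; omega
        have hpop : PySem.List.pop? (nums.drop i) 0 = some (nums[i], nums.drop (i + 1)) := by
          rw [(List.getElem_cons_drop hi).symm]; exact PySem.List.pop?_zero_cons _ _
        have hget : PySem.List.pyGet? nums (i : Int) = some nums[i] := by
          simp [PySem.List.pyGet?_natCast, List.getElem?_eq_getElem hi]
        have hstep : ((i : Int) + 1) = ((i + 1 : Nat) : Int) := by push_cast; ring
        simp only [pvALoop, pvBLoop, List.foldl_cons, hm, hpop, Option.map_some, hget, hstep]
        have := ih nums (terms ++ [-nums[i]]) (i + 1)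
          (by simp [hm] at hlen ⊢; omega)
        simpa [pvALoop, pvBLoop, List.sum_append, sub_eq_add_neg, hpop] using this
      · simp only [pvALoop, pvBLoop, List.foldl_cons, if_neg hp, if_neg hm]
        exact ih nums terms i
          (by simp [hp, hm] at hlen ⊢; omega)

-- ===== VERDICT (by name: the statement is the Claim_ definition above) =====
theorem perform_operations_spec : Claim_equal_perform_operations := by
  intro nums signs _hdom hpre
  unfold Spec_perform_operations perform_operations perform_operations_alt
  unfold Pre_perform_operations at hpre
  cases nums with
  | nil => simp at hpre
  | cons n ns =>
    have h0 : PySem.List.pyGet? (n :: ns) (0 : Int) = some n := PySem.List.pyGet?_zero_cons _ _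
    simp only [List.map_id_fun', id, PySem.List.pop?_zero_cons, h0, Option.getD_some]
    have := pv_loop_agree signs.toList (n :: ns) [n] 1 (by simpa using hpre)
    simpa using this
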